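-- pv_equiv track=rewrite | github.com/14sudarsan/Problem-Solving---DSA---100 | array/string/nqt6.py | nandr
-- ===== SOURCE A (Python) =====
-- def nandr(n ,r):
--
--     s = str(n)
--
--
--
--     sum1 = 0
--
--     for i in range(len(s)):
--
--         sum1 = sum1 + int(s[i])
--
--     sum2 = 0
--     for j in range (r):
--
--         sum2 = sum2 + sum1
--
--
--
--     sumarray = [int(digit) for digit in str(sum2)]
--
--     final = sum(sumarray)
--
--     return final
-- ===== SOURCE B (Python) =====
-- def nandr(n, r):
--     # digit sums by arithmetic; the r-fold addition loop collapses to one multiplication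
--     def digit_sum(m):
--         t = 0
--         while m > 0:
--             t += m % 10
--             m //= 10
--         return t
--     return digit_sum(digit_sum(n) * max(r, 0))
-- ===== Notes on version B (the rewrite author's own statement) =====
-- stated objective: faster
-- what changed: The r-iteration repeated-addition loop becomes a single multiplication sum1 * max(r, 0), and both digit sums are computed arithmetically with % 10 and // 10 instead of converting to str and summing int(char).
-- outside the precondition, e.g. on nandr(-5, 3): A raises ValueError, B returns 0
import Mathlib
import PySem

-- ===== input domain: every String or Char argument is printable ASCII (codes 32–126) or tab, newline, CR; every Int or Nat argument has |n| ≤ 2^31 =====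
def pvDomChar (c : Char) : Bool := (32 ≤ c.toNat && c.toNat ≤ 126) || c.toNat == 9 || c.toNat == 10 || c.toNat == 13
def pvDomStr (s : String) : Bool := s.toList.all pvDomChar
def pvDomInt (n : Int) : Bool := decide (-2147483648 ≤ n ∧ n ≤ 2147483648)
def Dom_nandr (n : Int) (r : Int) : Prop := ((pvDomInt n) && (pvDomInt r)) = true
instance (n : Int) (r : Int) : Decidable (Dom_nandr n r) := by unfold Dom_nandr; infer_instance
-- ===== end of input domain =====

-- B replaces A's O(r) repeated-addition loop by one multiplication and computes both
-- digit sums arithmetically (% 10, // 10) instead of through str(); return value only.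

-- ===== PORT A =====
-- int(s[i]) on a one-char slice; the '.getD 0' default is unreachable under Pre_nandr
-- (for n < 0 the '-' character makes int() raise ValueError, which Pre_ excludes).
def nandr (n : Int) (r : Int) : Int :=
  let s := (PySem.Int.toStr n).toList
  let sum1 := (PySem.List.pyRange 0 (PySem.List.len s) 1).foldl
      (fun acc i => acc + (PySem.Int.ofChars? [PySem.List.pyGetD s i '0']).getD 0) 0
  let sum2 := (PySem.List.pyRange 0 r 1).foldl (fun acc _ => acc + sum1) 0
  let sumarray := (PySem.Int.toStr sum2).toList.map
      (fun d => (PySem.Int.ofChars? [d]).getD 0)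
  sumarray.sum

-- ===== PORT B =====
-- termination helper for the while-loop recursion (cited by decreasing_by)
theorem pvFloordivTen_lt (m : Int) (h : 0 < m) :
    (PySem.Int.floordiv m 10).toNat < m.toNat := by
  have h1 : PySem.Int.floordiv m 10 < m := by
    rw [PySem.Int.floordiv_lt_iff_lt_mul (show (0:Int) < 10 by omega)]; omega
  have h2 : 0 ≤ PySem.Int.floordiv m 10 := by
    rw [PySem.Int.le_floordiv_iff_mul_le (show (0:Int) < 10 by omega)]; omega
  omega

def pvDigitSum (m : Int) : Int :=
  if h : 0 < m then PySem.Int.mod m 10 + pvDigitSum (PySem.Int.floordiv m 10) else 0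
termination_by m.toNat
decreasing_by exact pvFloordivTen_lt m h

def nandr_alt (n : Int) (r : Int) : Int :=
  pvDigitSum (pvDigitSum n * max r 0)

-- ===== PRECONDITION & SPEC =====
-- Pre_ excludes exactly n < 0, where A raises ValueError: str(n) starts with '-' and int('-') fails.
def Pre_nandr (n : Int) (r : Int) : Prop := 0 ≤ n
instance (n : Int) (r : Int) : Decidable (Pre_nandr n r) := by unfold Pre_nandr; infer_instance
def pvWitness_nandr : Int × Int := (427, 3)

def Spec_nandr (n : Int) (r : Int) (out : Int) : Prop := out = nandr_alt n r
instance (n : Int) (r : Int) (out : Int) : Decidable (Spec_nandr n r out) := by unfold Spec_nandr; infer_instance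

-- ===== CLAIM (what is proved, stated in full; the proofs are below) =====
def Claim_equal_nandr : Prop := ∀ (n : Int) (r : Int), Dom_nandr n r → Pre_nandr n r → Spec_nandr n r (nandr n r)

-- ===== LEMMAS AND PROOFS =====

-- value of a single decimal digit character under int()
theorem pvDigitVal (d : Nat) (hd : d < 10) :
    (PySem.Int.ofChars? [Nat.digitChar d]).getD 0 = (d : Int) := by
  interval_cases d <;> decide

theorem pvDigitSum_zero : pvDigitSum 0 = 0 := by
  unfold pvDigitSum; simp

theorem pvDigitSum_of_pos (m : Int) (h : 0 < m) :
    pvDigitSum m = PySem.Int.mod m 10 + pvDigitSum (PySem.Int.floordiv m 10) := by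
  rw [pvDigitSum]; simp [h]

-- the digit-character sum of str(m) equals the arithmetic digit sum, for m : Nat
theorem pvCharSum (m : Nat) :
    ((Nat.toDigits 10 m).map (fun d => (PySem.Int.ofChars? [d]).getD 0)).sum
      = pvDigitSum (m : Int) := by
  induction m using Nat.strong_induction_on with
  | _ m ih =>
    rw [Nat.toDigits_eq_if (by norm_num)]
    by_cases hm : m < 10
    · simp only [if_pos hm, List.map_cons, List.map_nil, List.sum_cons, List.sum_nil,
        pvDigitVal m hm]
      by_cases h0 : m = 0
      · simp [h0, pvDigitSum_zero]
      · have hpos : (0 : Int) < (m : Int) := by omega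
        rw [pvDigitSum_of_pos _ hpos]
        have h1 : PySem.Int.mod (m : Int) 10 = ((m % 10 : Nat) : Int) := by
          exact_mod_cast PySem.Int.mod_natCast m 10
        have h2 : PySem.Int.floordiv (m : Int) 10 = ((m / 10 : Nat) : Int) := by
          exact_mod_cast PySem.Int.floordiv_natCast m 10
        have h3 : m % 10 = m := Nat.mod_eq_of_lt hm
        have h4 : m / 10 = 0 := Nat.div_eq_of_lt hm
        rw [h1, h2, h3, h4]
        simp [pvDigitSum_zero]
    · simp only [if_neg hm, List.map_append, List.sum_append, List.map_cons, List.map_nil,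
        List.sum_cons, List.sum_nil]
      have hdiv : m / 10 < m := Nat.div_lt_self (by omega) (by norm_num)
      rw [ih (m / 10) hdiv, pvDigitVal (m % 10) (Nat.mod_lt m (by norm_num))]
      have hpos : (0 : Int) < (m : Int) := by omega
      have h1 : PySem.Int.mod (m : Int) 10 = ((m % 10 : Nat) : Int) := by
        exact_mod_cast PySem.Int.mod_natCast m 10
      have h2 : PySem.Int.floordiv (m : Int) 10 = ((m / 10 : Nat) : Int) := by
        exact_mod_cast PySem.Int.floordiv_natCast m 10
      rw [pvDigitSum_of_pos _ hpos, h1, h2]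
      ring

-- str(n).toList for nonnegative n is Nat.toDigits 10 n.toNat
theorem pvToStr_nonneg (n : Int) (h : 0 ≤ n) :
    (PySem.Int.toStr n).toList = Nat.toDigits 10 n.toNat := by
  rw [PySem.Int.toList_toStr]
  unfold PySem.Int.toChars
  rw [if_neg (by omega)]

-- a foldl that only adds is a map-sum
theorem pvFoldlAddSum (f : Char → Int) (l : List Char) (init : Int) :
    l.foldl (fun acc c => acc + f c) init = init + (l.map f).sum := by
  induction l generalizing init with
  | nil => simp
  | cons c t iht => simp [List.foldl_cons, iht]; ring

-- the repeated-addition loop of A is one multiplication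
theorem pvFoldlConstAdd (s1 : Int) (l : List Int) (init : Int) :
    l.foldl (fun acc _ => acc + s1) init = init + s1 * l.length := by
  induction l generalizing init with
  | nil => simp
  | cons x t iht => rw [List.foldl_cons, iht]; simp [List.length_cons]; ring

theorem pvRepeatAdd (r s1 : Int) :
    (PySem.List.pyRange 0 r 1).foldl (fun acc _ => acc + s1) 0 = s1 * max r 0 := by
  rw [pvFoldlConstAdd, PySem.List.length_pyRange_one]
  have : (((r - 0).toNat : Nat) : Int) = max r 0 := by omega
  rw [this]; ring

theorem pvDigitSum_nonneg (m : Int) : 0 ≤ pvDigitSum m := by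
  by_cases h : 0 < m
  · have : pvDigitSum m = PySem.Int.mod m 10 + pvDigitSum (PySem.Int.floordiv m 10) :=
      pvDigitSum_of_pos m h
    rw [this]
    have hmod : 0 ≤ PySem.Int.mod m 10 := by
      have hmn : PySem.Int.mod ((m.toNat : Nat) : Int) 10 = ((m.toNat % 10 : Nat) : Int) := by
        exact_mod_cast PySem.Int.mod_natCast m.toNat 10
      have hc : ((m.toNat : Int)) = m := by omega
      rw [hc] at hmn
      omega
    have := pvDigitSum_nonneg (PySem.Int.floordiv m 10)
    omega
  · unfold pvDigitSum; rw [dif_neg h]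
termination_by m.toNat
decreasing_by exact pvFloordivTen_lt m h

-- full digit-sum-of-str for any nonnegative Int
theorem pvStrSum (m : Int) (h : 0 ≤ m) :
    ((PySem.Int.toStr m).toList.map (fun d => (PySem.Int.ofChars? [d]).getD 0)).sum
      = pvDigitSum m := by
  rw [pvToStr_nonneg m h]
  have := pvCharSum m.toNat
  have hc : ((m.toNat : Int)) = m := by omega
  rwa [hc] at this

-- ===== VERDICT (by name: the statement is the Claim_ definition above) =====
theorem nandr_spec : Claim_equal_nandr := by
  intro n r _ hpre
  unfold Spec_nandr nandr nandr_alt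
  simp only []
  -- sum1: index loop over str(n) = pvDigitSum n
  have hsum1 :
      (PySem.List.pyRange 0 (PySem.List.len (PySem.Int.toStr n).toList) 1).foldl
        (fun acc i => acc + (PySem.Int.ofChars? [PySem.List.pyGetD (PySem.Int.toStr n).toList i '0']).getD 0) 0
      = pvDigitSum n := by
    rw [PySem.List.foldl_pyRange_zero_pyGetD (PySem.Int.toStr n).toList '0'
        (fun acc c => acc + (PySem.Int.ofChars? [c]).getD 0) 0]
    rw [pvFoldlAddSum]
    rw [pvStrSum n hpre]
    ring
  rw [hsum1, pvRepeatAdd r (pvDigitSum n)]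
  exact pvStrSum _ (by
    have h1 := pvDigitSum_nonneg n
    have h2 : (0 : Int) ≤ max r 0 := le_max_right r 0
    positivity)
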